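-- pv_equiv track=rewrite | github.com/lin13k/practice | algo_problems/q1-20/q10_2.py | shiftPattern
-- ===== SOURCE A (Python) =====
-- def shiftPattern(p):
--     result = p
--     asteriskPosition = [pos for pos, char in enumerate(p) if char == '*']
--     for i in asteriskPosition:
--         if i == 0:
--             raise Exception('no preceding element')
--         precedingChar = p[i - 1]
--         lastPos = 0
--         rightStr = p[i + 1:]
--         for j in range(len(rightStr)):
--             if rightStr[j] == precedingChar:
--                 lastPos += 1
--             else:
--                 if rightStr[j] == '*':
--                     lastPos -= 1
--                 break
--         if lastPos != 0:
--             result = p[:i] + p[i + lastPos] + \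
--                 p[i + 1:i + lastPos] + p[i] + p[i + lastPos + 1:]
--
--     return result
-- ===== SOURCE B (Python) =====
-- def shiftPattern(p):
--     if p.startswith('*'):
--         raise Exception('no preceding element')
--     n = len(p)
--     # One right-to-left pass. State describes the suffix p[i+1:]:
--     # (runChar, runLen) = its maximal leading run, afterStar = whether the
--     # character right after that run is '*'. No inner scan per asterisk.
--     runChar, runLen, afterStar = '', 0, False
--     for i in range(n - 1, 0, -1):
--         ch = p[i]
--         if ch == '*':
--             c = p[i - 1]
--             if c == runChar:
--                 lastPos = runLen - 1 if afterStar else runLen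
--             else:
--                 lastPos = -1 if (runLen > 0 and runChar == '*') else 0
--             if lastPos != 0:
--                 return p[:i] + p[i + lastPos] + p[i + 1:i + lastPos] + p[i] + p[i + lastPos + 1:]
--         if ch == runChar:
--             runLen += 1
--         else:
--             afterStar = runChar == '*'
--             runChar, runLen = ch, 1
--     return p
-- ===== Notes on version B (the rewrite author's own statement) =====
-- stated objective: alternative
-- what changed: B replaces A's forward overwrite-accumulate loop over asterisk positions, each with an inner character-by-character run scan, by a single right-to-left pass over the string that maintains the leading run of the current suffix (runChar, runLen, afterStar) in O(1) state, computes lastPos at each asterisk in O(1) from that state, and returns at the first qualifying asterisk (A's last); it raises up front iff the string starts with '*'.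
import Mathlib
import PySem

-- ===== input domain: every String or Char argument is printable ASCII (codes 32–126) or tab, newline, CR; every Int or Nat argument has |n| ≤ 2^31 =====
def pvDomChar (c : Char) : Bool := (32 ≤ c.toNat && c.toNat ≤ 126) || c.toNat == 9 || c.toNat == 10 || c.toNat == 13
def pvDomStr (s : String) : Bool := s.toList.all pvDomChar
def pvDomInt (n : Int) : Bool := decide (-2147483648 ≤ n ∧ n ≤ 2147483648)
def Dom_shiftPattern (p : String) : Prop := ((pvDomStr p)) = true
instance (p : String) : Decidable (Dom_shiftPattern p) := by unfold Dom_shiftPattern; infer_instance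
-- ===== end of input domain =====

-- B replaces A's per-asterisk inner run-scan and forward overwrite-accumulate loop by a
-- single right-to-left pass that maintains the leading run of the current suffix in O(1)
-- state and returns at the first (= rightmost) qualifying asterisk; objective: alternative.

-- ===== PORT A =====

-- p[:i] + p[i+lastPos] + p[i+1:i+lastPos] + p[i] + p[i+lastPos+1:]  (the swap expression,
-- textually identical in both Pythons)
def pvSwap (l : List Char) (i lastPos : Int) : List Char :=
  PySem.List.slice l none (some i) ++ [PySem.List.pyGetD l (i + lastPos) ' ']
    ++ PySem.List.slice l (some (i + 1)) (some (i + lastPos))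
    ++ [PySem.List.pyGetD l i ' ']
    ++ PySem.List.slice l (some (i + lastPos + 1)) none

-- A's inner 'for j in range(len(rightStr)) … break' as structural recursion on rightStr
def pvLastPosA : List Char → Char → Int
  | [], _ => 0
  | x :: xs, c => if x = c then 1 + pvLastPosA xs c else if x = '*' then -1 else 0

-- precedingChar = p[i-1]; rightStr = p[i+1:]; lastPos as A's loop computes it
def pvLastPosAt (l : List Char) (i : Int) : Int :=
  pvLastPosA (PySem.List.slice l (some (i + 1)) none) (PySem.List.pyGetD l (i - 1) ' ')

-- A's outer loop, threading 'result'; the 'i = 0' branch is where Python raises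
-- (excluded by Pre_), the port just stops there
def pvLoopA (l : List Char) : List Int → List Char → List Char
  | [], res => res
  | i :: rest, res =>
    if i = 0 then res
    else if pvLastPosAt l i ≠ 0 then pvLoopA l rest (pvSwap l i (pvLastPosAt l i))
    else pvLoopA l rest res

def shiftPattern (p : String) : String :=
  let l := p.toList
  let asteriskPosition := ((PySem.List.enumerate l).filter (fun pc => pc.2 = '*')).map Prod.fst
  String.ofList (pvLoopA l asteriskPosition l)

-- ===== PORT B =====

-- the state update at the end of B's loop body ('if ch == runChar: runLen += 1 else: …');
-- Python's initial runChar = '' (never equal to any char of p) is ported as none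
def pvUpd (ch : Char) (runChar : Option Char) (runLen : Nat) (afterStar : Bool) :
    Option Char × Nat × Bool :=
  if some ch = runChar then (runChar, runLen + 1, afterStar)
  else (some ch, 1, decide (runChar = some '*'))

-- B's lastPos computed in O(1) from the state ('if c == runChar: … else: …')
def pvLastPosB (c : Char) (runChar : Option Char) (runLen : Nat) (afterStar : Bool) : Int :=
  if some c = runChar then (if afterStar then (runLen : Int) - 1 else (runLen : Int))
  else if 0 < runLen ∧ runChar = some '*' then -1 else 0

-- B's 'for i in range(n-1, 0, -1)' with state (runChar, runLen, afterStar) describing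
-- the suffix p[i+1:]; indices read with getD are always in range when reached
def pvLoopB (l : List Char) : Nat → Option Char → Nat → Bool → List Char
  | 0, _, _, _ => l
  | i + 1, runChar, runLen, afterStar =>
    if l.getD (i + 1) ' ' = '*' then
      if pvLastPosB (l.getD i ' ') runChar runLen afterStar ≠ 0 then
        pvSwap l ((i : Int) + 1) (pvLastPosB (l.getD i ' ') runChar runLen afterStar)
      else
        pvLoopB l i (pvUpd (l.getD (i + 1) ' ') runChar runLen afterStar).1
          (pvUpd (l.getD (i + 1) ' ') runChar runLen afterStar).2.1
          (pvUpd (l.getD (i + 1) ' ') runChar runLen afterStar).2.2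
    else
      pvLoopB l i (pvUpd (l.getD (i + 1) ' ') runChar runLen afterStar).1
        (pvUpd (l.getD (i + 1) ' ') runChar runLen afterStar).2.1
        (pvUpd (l.getD (i + 1) ' ') runChar runLen afterStar).2.2

def shiftPattern_alt (p : String) : String :=
  if PySem.Str.startswith p "*" then p   -- Python raises here (excluded by Pre_)
  else String.ofList (pvLoopB p.toList (p.toList.length - 1) none 0 false)

-- ===== PRECONDITION & SPEC =====
-- Pre_ excludes exactly the inputs starting with '*', on which A (and B) raise Exception('no preceding element')
def Pre_shiftPattern (p : String) : Prop := p.toList.head? ≠ some '*'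
instance (p : String) : Decidable (Pre_shiftPattern p) := by unfold Pre_shiftPattern; infer_instance
def pvWitness_shiftPattern : String := "ab*aa*c"

def Spec_shiftPattern (p : String) (out : String) : Prop := out = shiftPattern_alt p
instance (p : String) (out : String) : Decidable (Spec_shiftPattern p out) := by unfold Spec_shiftPattern; infer_instance

-- ===== CLAIM (what is proved, stated in full; the proofs are below) =====
def Claim_equal_shiftPattern : Prop := ∀ (p : String), Dom_shiftPattern p → Pre_shiftPattern p → Spec_shiftPattern p (shiftPattern p)

-- ===== LEMMAS AND PROOFS =====

-- the takeWhile-based closed form of A's inner break-loop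
def pvLastPosOf (s : List Char) (c : Char) : Int :=
  if (s.takeWhile (fun x => x = c)).length < s.length ∧
      s.getD (s.takeWhile (fun x => x = c)).length ' ' = '*' then
    ((s.takeWhile (fun x => x = c)).length : Int) - 1
  else ((s.takeWhile (fun x => x = c)).length : Int)

lemma pvLastPosA_eq (rs : List Char) (c : Char) : pvLastPosA rs c = pvLastPosOf rs c := by
  induction rs with
  | nil => simp [pvLastPosA, pvLastPosOf]
  | cons x xs ih =>
    by_cases hx : x = c
    · subst hx
      rw [pvLastPosA, if_pos rfl, ih]
      simp only [pvLastPosOf, List.takeWhile_cons, decide_true, if_true, List.length_cons,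
        List.getD_cons_succ, Nat.add_lt_add_iff_right]
      split_ifs <;> push_cast <;> ring
    · rw [pvLastPosA, if_neg hx]
      simp [pvLastPosOf, hx]

-- pvLastPosAt at a natural index, in drop/getD form
lemma pvLastPosAt_nat (l : List Char) (i : Nat) :
    pvLastPosAt l ((i : Int) + 1) = pvLastPosOf (l.drop (i + 2)) (l.getD i ' ') := by
  unfold pvLastPosAt
  rw [show (i : Int) + 1 + 1 = ((i + 2 : Nat) : Int) by push_cast; ring,
    show (i : Int) + 1 - 1 = ((i : Nat) : Int) by ring,
    PySem.List.slice_from_natCast, PySem.List.pyGetD_natCast]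
  exact pvLastPosA_eq _ _

-- the reverse short-circuit loop over star positions (proof-side bridge)
def pvLoopRev (l : List Char) : List Int → List Char → List Char
  | [], res => res
  | z :: rest, res =>
    if pvLastPosAt l z ≠ 0 then pvSwap l z (pvLastPosAt l z) else pvLoopRev l rest res

lemma pvLoopRev_append_singleton (l : List Char) (ps : List Int) (z : Int) (res : List Char) :
    pvLoopRev l (ps ++ [z]) res =
      pvLoopRev l ps (if pvLastPosAt l z ≠ 0 then pvSwap l z (pvLastPosAt l z) else res) := by
  induction ps generalizing res with
  | nil => rfl
  | cons j rest ih => simp only [pvLoopRev, List.cons_append, ih]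

lemma pvLoopA_eq_rev (l : List Char) (ps : List Int) (res : List Char) (h0 : (0:Int) ∉ ps) :
    pvLoopA l ps res = pvLoopRev l ps.reverse res := by
  induction ps generalizing res with
  | nil => rfl
  | cons i rest ih =>
    have hi : i ≠ 0 := fun h => h0 (by simp [h])
    have hrest : (0:Int) ∉ rest := fun h => h0 (List.mem_cons_of_mem _ h)
    rw [pvLoopA, if_neg hi, List.reverse_cons, pvLoopRev_append_singleton]
    split_ifs with h
    · exact ih _ hrest
    · exact ih _ hrest

-- index-downward scan acting at stars (proof-side bridge between B's loop and pvLoopRev)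
def pvScan (l : List Char) : Nat → List Char
  | 0 => l
  | i + 1 =>
    if l.getD (i + 1) ' ' = '*' ∧ pvLastPosAt l ((i : Int) + 1) ≠ 0 then
      pvSwap l ((i : Int) + 1) (pvLastPosAt l ((i : Int) + 1))
    else pvScan l i

-- the star positions in [1..i], descending
def pvRevStars (l : List Char) : Nat → List Int
  | 0 => []
  | i + 1 => if l.getD (i + 1) ' ' = '*' then ((i : Int) + 1) :: pvRevStars l i else pvRevStars l i

lemma pvScan_eq_rev (l : List Char) : ∀ i : Nat, pvScan l i = pvLoopRev l (pvRevStars l i) l := by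
  intro i
  induction i with
  | zero => rfl
  | succ i ih =>
    rw [pvScan, pvRevStars]
    by_cases hstar : l.getD (i + 1) ' ' = '*'
    · rw [if_pos hstar, pvLoopRev]
      by_cases hlp : pvLastPosAt l ((i : Int) + 1) ≠ 0
      · rw [if_pos ⟨hstar, hlp⟩, if_pos hlp]
      · rw [if_neg (fun hc => hlp hc.2), if_neg hlp]; exact ih
    · rw [if_neg hstar, if_neg (fun hc => hstar hc.1)]; exact ih

-- A's enumerate-filter star list as a filtered pyRange
lemma pvStars_eq_filter (l : List Char) :
    ((PySem.List.enumerate l).filter (fun pc => pc.2 = '*')).map Prod.fst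
      = (PySem.List.pyRange 0 (l.length : Int) 1).filter
          (fun z => PySem.List.pyGetD l z ' ' = '*') := by
  rw [PySem.List.enumerate_eq_map_pyRange (d := ' '), List.filter_map, List.map_map]
  simp [Function.comp_def]

lemma pvRevStars_eq (l : List Char) : ∀ i : Nat,
    (((PySem.List.pyRange 1 ((i : Int) + 1) 1).filter
        (fun z => PySem.List.pyGetD l z ' ' = '*'))).reverse = pvRevStars l i := by
  intro i
  induction i with
  | zero => simp [PySem.List.pyRange_one_eq_nil, pvRevStars]
  | succ i ih =>
    have hg : PySem.List.pyGetD l ((i : Int) + 1) ' ' = l.getD (i + 1) ' ' := by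
      rw [show (i : Int) + 1 = ((i + 1 : Nat) : Int) by push_cast; ring,
        PySem.List.pyGetD_natCast]
    rw [show ((i + 1 : Nat) : Int) + 1 = ((i : Int) + 1) + 1 by push_cast; ring,
      PySem.List.pyRange_one_succ_right (show (1 : Int) ≤ (i : Int) + 1 by omega),
      List.filter_append, List.reverse_append, pvRevStars]
    by_cases hstar : l.getD (i + 1) ' ' = '*'
    · rw [if_pos hstar]
      simp only [List.filter_cons, List.filter_nil, hg, hstar, decide_true, if_true,
        List.reverse_cons, List.reverse_nil, List.nil_append, List.singleton_append, ih]
    · rw [if_neg hstar]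
      simp only [List.filter_cons, List.filter_nil, hg, decide_eq_true_eq, if_neg hstar,
        List.reverse_nil, List.nil_append, ih]

lemma pvStars_reverse (l : List Char) (h : l.head? ≠ some '*') :
    (((PySem.List.enumerate l).filter (fun pc => pc.2 = '*')).map Prod.fst).reverse
      = pvRevStars l (l.length - 1) := by
  cases l with
  | nil => simp [PySem.List.enumerate, pvRevStars]
  | cons a t =>
    have ha : a ≠ '*' := fun he => h (by simp [he])
    have h0 : PySem.List.pyGetD (a :: t) (0 : Int) ' ' = a := by
      rw [show (0 : Int) = ((0 : Nat) : Int) from rfl, PySem.List.pyGetD_natCast]; rfl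
    rw [pvStars_eq_filter]
    rw [show ((a :: t).length : Int) = ((t.length : Int)) + 1 by push_cast [List.length_cons]; ring]
    rw [PySem.List.pyRange_one_cons (by omega)]
    rw [List.filter_cons, if_neg (by simp [h0, ha])]
    rw [show (0 : Int) + 1 = 1 from rfl]
    simpa using pvRevStars_eq (a :: t) t.length

-- canonical loop state for a suffix s: its head, the length of its maximal leading run,
-- and whether the character right after that run is '*'
def pvStateOf (s : List Char) : Option Char × Nat × Bool :=
  match s with
  | [] => (none, 0, false)
  | hd :: _ => (some hd, (s.takeWhile (fun x => x = hd)).length,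
      decide (s.getD (s.takeWhile (fun x => x = hd)).length ' ' = '*'))

lemma pvStateOf_cons (ch : Char) (s : List Char) :
    pvStateOf (ch :: s) = pvUpd ch (pvStateOf s).1 (pvStateOf s).2.1 (pvStateOf s).2.2 := by
  cases s with
  | nil => simp [pvStateOf, pvUpd]
  | cons hd t =>
    by_cases hch : ch = hd
    · subst hch
      simp [pvStateOf, pvUpd]
    · simp [pvStateOf, pvUpd, hch, Ne.symm hch]

-- the O(1)-state lastPos formula agrees with the takeWhile closed form
lemma pvLastPos_state (s : List Char) (c : Char) :
    pvLastPosB c (pvStateOf s).1 (pvStateOf s).2.1 (pvStateOf s).2.2 = pvLastPosOf s c := by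
  cases s with
  | nil => simp [pvStateOf, pvLastPosOf, pvLastPosB]
  | cons hd t =>
    simp only [pvStateOf, pvLastPosB, pvLastPosOf]
    by_cases hc : c = hd
    · subst hc
      simp only [Option.some.injEq, decide_eq_true_eq]
      by_cases hg : (c :: t).getD ((c :: t).takeWhile (fun x => x = c)).length ' ' = '*'
      · have hlt : ((c :: t).takeWhile (fun x => x = c)).length < (c :: t).length := by
          rcases Nat.lt_or_ge ((c :: t).takeWhile (fun x => x = c)).length (c :: t).length with h | h
          · exact h
          · rw [List.getD_eq_default _ _ h] at hg; simp at hg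
        have hand : ((c :: t).takeWhile (fun x => x = c)).length < (c :: t).length ∧
            (c :: t).getD ((c :: t).takeWhile (fun x => x = c)).length ' ' = '*' := ⟨hlt, hg⟩
        rw [if_pos hg, if_pos hand]
        simp
      · have hand : ¬(((c :: t).takeWhile (fun x => x = c)).length < (c :: t).length ∧
            (c :: t).getD ((c :: t).takeWhile (fun x => x = c)).length ' ' = '*') :=
          fun hcon => hg hcon.2
        rw [if_neg hg, if_neg hand]
        simp
    · rw [if_neg (by simp [hc])]
      have hch' : hd ≠ c := fun h => hc h.symm
      have hrun0 : ((hd :: t).takeWhile (fun x => x = c)).length = 0 := by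
        simp [hch']
      rw [hrun0]
      have hg0 : (hd :: t).getD 0 ' ' = hd := rfl
      have hpos : 0 < ((hd :: t).takeWhile (fun x => x = hd)).length := by simp
      split_ifs with h1 h2 h2
      · norm_num
      · exact absurd ⟨by simp, by rw [hg0]; exact Option.some.inj h1.2⟩ h2
      · exact absurd ⟨hpos, congrArg some (hg0.symm.trans h2.2)⟩ h1
      · norm_num

lemma pvLoopB_eq_scan (l : List Char) : ∀ i : Nat, i < l.length →
    ∀ rc rl as, (rc, rl, as) = pvStateOf (l.drop (i + 1)) →
    pvLoopB l i rc rl as = pvScan l i := by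
  intro i
  induction i with
  | zero => intro _ rc rl as _; rfl
  | succ i ih =>
    intro h rc rl as hst
    have hdrop : l.drop (i + 1) = l[i + 1] :: l.drop (i + 2) := List.drop_eq_getElem_cons h
    have hch : l.getD (i + 1) ' ' = l[i + 1] := List.getD_eq_getElem l ' ' h
    have hupd : (pvUpd (l.getD (i + 1) ' ') rc rl as) = pvStateOf (l.drop (i + 1)) := by
      rw [hdrop, pvStateOf_cons, hch]
      have h1 : rc = (pvStateOf (l.drop (i + 2))).1 := by rw [← hst]
      have h2 : rl = (pvStateOf (l.drop (i + 2))).2.1 := by rw [← hst]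
      have h3 : as = (pvStateOf (l.drop (i + 2))).2.2 := by rw [← hst]
      rw [h1, h2, h3]
    have hih : ∀ rc' rl' as', (rc', rl', as') = pvStateOf (l.drop (i + 1)) →
        pvLoopB l i rc' rl' as' = pvScan l i :=
      fun rc' rl' as' h' => ih (Nat.lt_of_succ_lt h) rc' rl' as' h'
    have hlp : pvLastPosB (l.getD i ' ') rc rl as = pvLastPosAt l ((i : Int) + 1) := by
      rw [pvLastPosAt_nat]
      have h1 : rc = (pvStateOf (l.drop (i + 2))).1 := by rw [← hst]
      have h2 : rl = (pvStateOf (l.drop (i + 2))).2.1 := by rw [← hst]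
      have h3 : as = (pvStateOf (l.drop (i + 2))).2.2 := by rw [← hst]
      rw [h1, h2, h3]
      exact pvLastPos_state _ _
    by_cases hstar : l[i + 1] = '*'
    · by_cases hlp0 : pvLastPosAt l ((i : Int) + 1) ≠ 0
      · rw [pvLoopB, pvScan]
        rw [if_pos (by rw [hch]; exact hstar), hlp, if_pos hlp0,
          if_pos ⟨by rw [hch]; exact hstar, hlp0⟩]
      · rw [pvLoopB, pvScan]
        rw [if_pos (by rw [hch]; exact hstar), hlp, if_neg hlp0,
          if_neg (fun hcon => hlp0 hcon.2)]
        exact hih _ _ _ (by rw [← hupd])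
    · rw [pvLoopB, pvScan]
      rw [if_neg (by rw [hch]; exact hstar),
        if_neg (fun hcon => hstar (by rw [← hch]; exact hcon.1))]
      exact hih _ _ _ (by rw [← hupd])

lemma pv_enumerate_fst_le (l : List Char) (s : Int) :
    ∀ pr ∈ PySem.List.enumerate l s, s ≤ pr.1 := by
  induction l generalizing s with
  | nil => simp [PySem.List.enumerate]
  | cons a t ih =>
    intro pr hpr
    rcases (by simpa [PySem.List.enumerate] using hpr :
        pr = (s, a) ∨ pr ∈ PySem.List.enumerate t (s + 1)) with h | h
    · simp [h]
    · have := ih (s + 1) pr h; omega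

lemma pv_zero_not_mem_stars (l : List Char) (h : l.head? ≠ some '*') :
    (0:Int) ∉ ((PySem.List.enumerate l).filter (fun pc => pc.2 = '*')).map Prod.fst := by
  intro hmem
  rcases List.mem_map.1 hmem with ⟨⟨idx, ch⟩, hf, hfst⟩
  rcases List.mem_filter.1 hf with ⟨he, hch⟩
  simp only [decide_eq_true_eq] at hch
  simp only at hfst
  cases l with
  | nil => simp [PySem.List.enumerate] at he
  | cons a t =>
    have ha : a ≠ '*' := fun hEq => h (by simp [hEq])
    rcases (by simpa [PySem.List.enumerate] using he :
        (idx, ch) = (0, a) ∨ (idx, ch) ∈ PySem.List.enumerate t 1) with hcase | hcase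
    · rw [Prod.mk.injEq] at hcase
      exact ha (hcase.2 ▸ hch)
    · have := pv_enumerate_fst_le t 1 _ hcase
      simp only at this
      omega

lemma pv_startswith_false (p : String) (h : p.toList.head? ≠ some '*') :
    PySem.Str.startswith p "*" = false := by
  simp only [PySem.Str.startswith, PySem.Chars.startswith]
  cases hl : p.toList with
  | nil => simp
  | cons a t =>
    have ha : a ≠ '*' := fun he => h (by simp [hl, he])
    simp [List.isPrefixOf, Ne.symm ha]

-- ===== VERDICT (by name: the statement is the Claim_ definition above) =====
theorem shiftPattern_spec : Claim_equal_shiftPattern := by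
  intro p _ hpre
  unfold Spec_shiftPattern shiftPattern shiftPattern_alt
  rw [pv_startswith_false p hpre]
  rw [if_neg (show ¬(false = true) by decide)]
  show String.ofList (pvLoopA p.toList
      (((PySem.List.enumerate p.toList).filter (fun pc => pc.2 = '*')).map Prod.fst) p.toList)
    = String.ofList (pvLoopB p.toList (p.toList.length - 1) none 0 false)
  cases hl : p.toList with
  | nil => simp [PySem.List.enumerate, pvLoopA, pvLoopB]
  | cons a t =>
    rw [← hl]
    have hlen : p.toList.length - 1 < p.toList.length := by rw [hl]; simp
    have hstate : ((none : Option Char), 0, false)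
        = pvStateOf (p.toList.drop (p.toList.length - 1 + 1)) := by
      rw [show p.toList.length - 1 + 1 = p.toList.length by rw [hl]; simp]
      rw [List.drop_length]
      rfl
    rw [pvLoopA_eq_rev _ _ _ (pv_zero_not_mem_stars _ hpre)]
    rw [pvStars_reverse _ hpre]
    rw [← pvScan_eq_rev]
    rw [pvLoopB_eq_scan _ _ hlen _ _ _ hstate]
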